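-- pv_equiv track=rewrite | github.com/anniebryan/advent-of-code | src/aoc_2023/day_13/solution.py | get_new_mirror
-- ===== SOURCE A (Python) =====
-- def lines_different(d: dict[int, str], indices_equal: dict[tuple[int, int]: bool], mirror: int) -> int:
--     lines = set()
--     i = mirror
--     j = mirror + 1
--     while i >= 1 and j <= len(d):
--         if not indices_equal[(i, j)]:
--             lines.add((i, j))
--         i -= 1
--         j += 1
--     return lines
--
-- def num_chars_different(a: str, b: str) -> int:
--     num = 0
--     for sa, sb in zip(a, b):
--         if sa != sb:
--             num += 1
--     return num
--
-- def get_new_mirror(d: dict[int, str]) -> int: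
--     indices_equal = {(i, j): d[i] == d[j] for i in d for j in d}
--     for mirror in range(1, len(d)):
--         l = lines_different(d, indices_equal, mirror)
--         if len(l) == 1:
--             a, b = min(l)
--             if num_chars_different(d[a], d[b]) == 1:
--                 return mirror
--     return None
-- ===== SOURCE B (Python) =====
-- def num_chars_different(a: str, b: str) -> int:
--     num = 0
--     for sa, sb in zip(a, b):
--         if sa != sb:
--             num += 1
--     return num
--
-- def get_new_mirror(d: dict[int, str]) -> int:
--     # Group every unequal row pair (i, j) once by the anti-diagonal i + j:
--     # the reflected pairs of mirror m are exactly the pairs with i + j == 2*m + 1.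
--     n = len(d)
--     buckets = {}
--     for i in range(1, n + 1):
--         for j in range(i + 1, n + 1):
--             if (i + j) % 2 == 1 and d[i] != d[j]:
--                 buckets.setdefault((i + j) // 2, []).append((i, j))
--     for m in range(1, n):
--         l = buckets.get(m, [])
--         if len(l) == 1:
--             a, b = l[0]
--             if num_chars_different(d[a], d[b]) == 1:
--                 return m
--     return None
-- ===== Notes on version B (the rewrite author's own statement) =====
-- stated objective: alternative
-- what changed: B replaces A's per-mirror outward two-pointer walk over a precomputed n-by-n equality table (plus set/min/recheck) by a single pass over all row pairs that buckets the unequal pairs by their anti-diagonal i+j (mirror m owns the pairs with i+j = 2m+1); each mirror is then decided by reading its bucket.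
-- outside the precondition, e.g. on get_new_mirror({1: 'a', 2: 'b', 7: 'x'}): A returns 1, B raises KeyError
import Mathlib
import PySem

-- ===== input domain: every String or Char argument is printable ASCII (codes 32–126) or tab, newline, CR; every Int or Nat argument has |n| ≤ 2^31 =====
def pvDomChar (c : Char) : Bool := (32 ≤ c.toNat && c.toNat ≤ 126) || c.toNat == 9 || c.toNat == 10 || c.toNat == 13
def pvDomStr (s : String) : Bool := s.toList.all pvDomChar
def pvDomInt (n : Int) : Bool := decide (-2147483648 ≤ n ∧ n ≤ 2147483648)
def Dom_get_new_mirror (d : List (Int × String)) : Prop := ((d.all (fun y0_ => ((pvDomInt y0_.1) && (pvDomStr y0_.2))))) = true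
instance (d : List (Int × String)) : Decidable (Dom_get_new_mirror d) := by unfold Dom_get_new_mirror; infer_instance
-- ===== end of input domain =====

-- B drops A's per-mirror outward walk, its precomputed equality table and its set/min/recheck
-- phases: one pass over all row pairs buckets the unequal pairs by anti-diagonal i+j (the pairs
-- reflected by mirror m are exactly those with i+j = 2m+1), then each mirror is read off its
-- bucket (objective: alternative decomposition, same asymptotic cost).

-- ===== PORT A =====
-- num_chars_different(a, b) — shared helper of both Python versions
def numCharsDifferent (a b : String) : Int :=
  (a.toList.zip b.toList).foldl (fun num p => if p.1 ≠ p.2 then num + 1 else num) 0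

-- d[k] on a dict: KeyError on a missing key in Python; the port reads `getD "" ` there —
-- exact on Pre_, where every accessed key is present.
def dGet (d : List (Int × String)) (k : Int) : String := (PySem.Dict.mk d).getD k ""

-- while i >= 1 and j <= len(d): add (i, j) to the set when not indices_equal[(i, j)].
-- indices_equal[(i, j)]: KeyError on a missing pair in Python; `getD … true` here — exact on Pre_.
def linesDifferentGo (ie : PySem.Dict (Int × Int) Bool) (n : Int) (i j : Int)
    (acc : PySem.Set (Int × Int)) : PySem.Set (Int × Int) :=
  if _h : 1 ≤ i ∧ j ≤ n then
    linesDifferentGo ie n (i - 1) (j + 1)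
      (if ie.getD (i, j) true = false then PySem.Set.add acc (i, j) else acc)
  else acc
termination_by (n + 1 - j).toNat
decreasing_by omega

-- lines_different(d, indices_equal, mirror)  (n = len(d))
def lines_different (n : Int) (ie : PySem.Dict (Int × Int) Bool) (mirror : Int) :
    PySem.Set (Int × Int) :=
  linesDifferentGo ie n mirror (mirror + 1) PySem.Set.empty

-- the 'for mirror in range(1, len(d))' loop of A
def getNewMirrorGoA (d : List (Int × String)) (n : Int) (ie : PySem.Dict (Int × Int) Bool) :
    List Int → Option Int
  | [] => none
  | mirror :: rest =>
    let l := lines_different n ie mirror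
    if PySem.Set.len l == 1 then
      match PySem.List.min2? l Prod.fst Prod.snd with   -- a, b = min(l)  (Python tuple order)
      | some (a, b) =>
        if numCharsDifferent (dGet d a) (dGet d b) == 1 then some mirror
        else getNewMirrorGoA d n ie rest
      | none => getNewMirrorGoA d n ie rest             -- unreachable: len(l) == 1
    else getNewMirrorGoA d n ie rest

def get_new_mirror (d : List (Int × String)) : Option Int :=
  let dd := PySem.Dict.mk d
  let ie := dd.keys.foldl
    (fun m i => dd.keys.foldl (fun m j => m.insert (i, j) (dd.get? i == dd.get? j)) m)
    PySem.Dict.empty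
  getNewMirrorGoA d (dd.size : Int) ie (PySem.List.pyRange 1 (dd.size : Int) 1)

-- ===== PORT B =====
-- the nested 'for i … for j …' loop: buckets.setdefault((i+j)//2, []).append((i, j))
def buildBuckets (d : List (Int × String)) (n : Int) : PySem.Dict Int (List (Int × Int)) :=
  (PySem.List.pyRange 1 (n + 1) 1).foldl (fun acc i =>
    (PySem.List.pyRange (i + 1) (n + 1) 1).foldl (fun acc j =>
      if PySem.Int.mod (i + j) 2 = 1 ∧ dGet d i ≠ dGet d j then
        acc.insert (PySem.Int.floordiv (i + j) 2)
          (acc.getD (PySem.Int.floordiv (i + j) 2) [] ++ [(i, j)])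
      else acc) acc)
    PySem.Dict.empty

-- the 'for m in range(1, n)' loop of B
def getNewMirrorGoB (d : List (Int × String)) (buckets : PySem.Dict Int (List (Int × Int))) :
    List Int → Option Int
  | [] => none
  | m :: rest =>
    let l := buckets.getD m []
    if l.length == 1 then
      match PySem.List.pyGet? l 0 with                  -- a, b = l[0]
      | some (a, b) =>
        if numCharsDifferent (dGet d a) (dGet d b) == 1 then some m
        else getNewMirrorGoB d buckets rest
      | none => getNewMirrorGoB d buckets rest          -- unreachable: len(l) == 1
    else getNewMirrorGoB d buckets rest

def get_new_mirror_alt (d : List (Int × String)) : Option Int :=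
  let n : Int := ((PySem.Dict.mk d).size : Int)
  getNewMirrorGoB d (buildBuckets d n) (PySem.List.pyRange 1 n 1)

-- ===== PRECONDITION & SPEC =====
-- Pre_ excludes dicts of length ≥ 2 whose key set is not exactly {1..n}: on those A hits a
-- KeyError in the mirror scan for most inputs (it can return a mirror found before any missing
-- key is touched — see the cite in claim.json).
def Pre_get_new_mirror (d : List (Int × String)) : Prop :=
  (d.map Prod.fst).Perm ((List.range d.length).map (fun i : Nat => ((i : Int) + 1))) ∨ d.length ≤ 1
instance (d : List (Int × String)) : Decidable (Pre_get_new_mirror d) := by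
  unfold Pre_get_new_mirror; infer_instance

def pvWitness_get_new_mirror : (List (Int × String)) := [(1, "#."), (2, "#."), (3, "..")]

def Spec_get_new_mirror (d : List (Int × String)) (out : Option Int) : Prop := out = get_new_mirror_alt d
instance (d : List (Int × String)) (out : Option Int) : Decidable (Spec_get_new_mirror d out) := by
  unfold Spec_get_new_mirror; infer_instance

-- ===== CLAIM (what is proved, stated in full; the proofs are below) =====
def Claim_equal_get_new_mirror : Prop := ∀ (d : List (Int × String)), Dom_get_new_mirror d → Pre_get_new_mirror d → Spec_get_new_mirror d (get_new_mirror d)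

-- ===== LEMMAS AND PROOFS =====

-- proof-side skeleton of A's per-mirror walk: the pairs (i, j) whose rows differ, i descending
def pairsW (d : List (Int × String)) (n : Int) (i j : Int) : List (Int × Int) :=
  if _h : 1 ≤ i ∧ j ≤ n then
    (if dGet d i ≠ dGet d j then [(i, j)] else []) ++ pairsW d n (i - 1) (j + 1)
  else []
termination_by (n + 1 - j).toNat
decreasing_by all_goals omega

-- proof-side skeleton of B's bucket for mirror m: the same pairs, i ascending up to i
def ascPairs (d : List (Int × String)) (n m i : Int) : List (Int × Int) :=
  if _h : 1 ≤ i ∧ 2 * m + 1 - i ≤ n then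
    ascPairs d n m (i - 1) ++
      (if dGet d i ≠ dGet d (2 * m + 1 - i) then [(i, 2 * m + 1 - i)] else [])
  else []
termination_by i.toNat
decreasing_by omega

theorem getD_foldl_insert_fun {κ ν : Type} [BEq κ] [LawfulBEq κ] [DecidableEq κ]
    (f : κ → ν) (l : List κ) (m : PySem.Dict κ ν) (x : κ) (dflt : ν) :
    (l.foldl (fun m k => m.insert k (f k)) m).getD x dflt
      = if x ∈ l then f x else m.getD x dflt := by
  induction l generalizing m with
  | nil => simp
  | cons k t ih =>
    simp only [List.foldl_cons, ih, PySem.Dict.getD_insert, List.mem_cons]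
    by_cases hxt : x ∈ t <;> by_cases hxk : x = k <;> simp [hxt, hxk]

theorem getD_nested_insert {κ ν : Type} [BEq κ] [LawfulBEq κ] [DecidableEq κ]
    (F : κ × κ → ν) (lo li : List κ) (m : PySem.Dict (κ × κ) ν) (x : κ × κ) (dflt : ν) :
    (lo.foldl (fun m i => li.foldl (fun m j => m.insert (i, j) (F (i, j))) m) m).getD x dflt
      = if x.1 ∈ lo ∧ x.2 ∈ li then F x else m.getD x dflt := by
  induction lo generalizing m with
  | nil => simp
  | cons i t ih =>
    have hinner : ∀ m : PySem.Dict (κ × κ) ν,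
        (li.foldl (fun m j => m.insert (i, j) (F (i, j))) m).getD x dflt
          = if x ∈ li.map (fun j => (i, j)) then F x else m.getD x dflt := by
      intro m
      have h := getD_foldl_insert_fun F (li.map (fun j => ((i, j) : κ × κ))) m x dflt
      rw [List.foldl_map] at h
      simpa using h
    rcases x with ⟨a, b⟩
    simp only [List.foldl_cons, ih, hinner, List.mem_map, List.mem_cons]
    by_cases ha : a ∈ t <;> by_cases hb : b ∈ li <;> by_cases hai : a = i <;>
      first
      | (simp [ha, hb, hai]; done)
      | (simp [ha, hb, hai]; exact fun h => absurd h.symm hai)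

theorem get?_mk_of_mem_fst {κ ν : Type} [BEq κ] [LawfulBEq κ]
    (d : List (κ × ν)) (k : κ) (h : k ∈ d.map Prod.fst) :
    ∃ v, (PySem.Dict.mk d).get? k = some v := by
  induction d with
  | nil => simp at h
  | cons p t ih =>
    rcases p with ⟨a, v⟩
    rw [PySem.Dict.get?_mk_cons]
    by_cases hak : a = k
    · exact ⟨v, by simp [hak]⟩
    · have : k ∈ t.map Prod.fst := by
        rcases List.mem_cons.1 h with h1 | h1
        · exact absurd h1.symm hak
        · exact h1
      simpa [hak] using ih this

theorem linesGo_eq (d : List (Int × String)) (n : Int) (ie : PySem.Dict (Int × Int) Bool)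
    (hie : ∀ i j : Int, 1 ≤ i → i ≤ n → 1 ≤ j → j ≤ n →
      (ie.getD (i, j) true = false ↔ dGet d i ≠ dGet d j)) :
    ∀ (fuel : Nat) (i j : Int) (acc : List (Int × Int)), (n + 1 - j).toNat ≤ fuel →
      i ≤ n → 1 ≤ j → (∀ p ∈ acc, i < p.1) →
      linesDifferentGo ie n i j acc = acc ++ pairsW d n i j := by
  intro fuel
  induction fuel with
  | zero =>
    intro i j acc hf hi hj _hacc
    rw [linesDifferentGo.eq_def, pairsW.eq_def]
    by_cases hg : 1 ≤ i ∧ j ≤ n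
    · exfalso; omega
    · rw [dif_neg hg, dif_neg hg]; simp
  | succ f ih =>
    intro i j acc hf hi hj hacc
    rw [linesDifferentGo.eq_def, pairsW.eq_def]
    by_cases hg : 1 ≤ i ∧ j ≤ n
    · rw [dif_pos hg, dif_pos hg]
      by_cases hd : dGet d i = dGet d j
      · have hcond : ¬ (ie.getD (i, j) true = false) := by
          rw [hie i j hg.1 hi hj hg.2]; simp [hd]
        rw [if_neg hcond, if_neg (by simp [hd])]
        rw [ih (i - 1) (j + 1) acc (by omega) (by omega) (by omega)
          (fun p hp => by have := hacc p hp; omega)]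
        simp
      · have hcond : ie.getD (i, j) true = false := by
          rw [hie i j hg.1 hi hj hg.2]; exact hd
        rw [if_pos hcond, if_pos hd]
        have hnm : (i, j) ∉ acc := fun hmem => absurd (hacc _ hmem) (by simp)
        rw [PySem.Set.add_of_not_mem hnm]
        rw [ih (i - 1) (j + 1) (acc ++ [(i, j)]) (by omega) (by omega) (by omega)
          (fun p hp => by
            rcases List.mem_append.1 hp with h1 | h1
            · have := hacc p h1; omega
            · simp at h1; subst h1; simp)]
        simp
    · rw [dif_neg hg, dif_neg hg]; simp

-- the inner j-fold of buildBuckets, read at bucket m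
theorem bInner_getD (d : List (Int × String)) (i m : Int) (js : List Int)
    (D : PySem.Dict Int (List (Int × Int))) :
    (js.foldl (fun acc j =>
        if PySem.Int.mod (i + j) 2 = 1 ∧ dGet d i ≠ dGet d j then
          acc.insert (PySem.Int.floordiv (i + j) 2)
            (acc.getD (PySem.Int.floordiv (i + j) 2) [] ++ [(i, j)])
        else acc) D).getD m []
      = D.getD m [] ++
        ((js.filter (fun j => decide (PySem.Int.mod (i + j) 2 = 1 ∧
            PySem.Int.floordiv (i + j) 2 = m ∧ dGet d i ≠ dGet d j))).map
          (fun j => ((i, j) : Int × Int))) := by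
  induction js generalizing D with
  | nil => simp
  | cons j t ih =>
    by_cases hc : PySem.Int.mod (i + j) 2 = 1 ∧ dGet d i ≠ dGet d j
    · by_cases hk : PySem.Int.floordiv (i + j) 2 = m
      · simp only [List.foldl_cons, if_pos hc, ih, hk, PySem.Dict.getD_insert,
          List.filter_cons]
        have hc1 : (i + j) % 2 = 1 := by simpa [pysem] using hc.1
        simp [hc1, hc.2]
      · simp only [List.foldl_cons, if_pos hc, ih, PySem.Dict.getD_insert,
          List.filter_cons]
        rw [if_neg (fun h => hk h.symm),
          if_neg (by simp only [decide_eq_true_eq]; exact fun h => hk h.2.1)]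
    · simp only [List.foldl_cons, if_neg hc, ih, List.filter_cons]
      rw [if_neg (by simp only [decide_eq_true_eq]; exact fun h => hc ⟨h.1, h.2.2⟩)]

-- the outer i-fold of buildBuckets, read at bucket m
theorem bBuild_getD (d : List (Int × String)) (n m : Int) (is : List Int)
    (D : PySem.Dict Int (List (Int × Int))) :
    (is.foldl (fun acc i =>
        (PySem.List.pyRange (i + 1) (n + 1) 1).foldl (fun acc j =>
          if PySem.Int.mod (i + j) 2 = 1 ∧ dGet d i ≠ dGet d j then
            acc.insert (PySem.Int.floordiv (i + j) 2)
              (acc.getD (PySem.Int.floordiv (i + j) 2) [] ++ [(i, j)])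
          else acc) acc) D).getD m []
      = D.getD m [] ++
        is.flatMap (fun i =>
          ((PySem.List.pyRange (i + 1) (n + 1) 1).filter (fun j =>
              decide (PySem.Int.mod (i + j) 2 = 1 ∧
                PySem.Int.floordiv (i + j) 2 = m ∧ dGet d i ≠ dGet d j))).map
            (fun j => ((i, j) : Int × Int))) := by
  induction is generalizing D with
  | nil => simp
  | cons i t ih =>
    rw [List.foldl_cons, ih, bInner_getD, List.flatMap_cons, ← List.append_assoc]

-- '(i+j) % 2 == 1 and (i+j) // 2 == m' says exactly 'j = 2m+1-i'
theorem key_iff (i j m : Int) :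
    (PySem.Int.mod (i + j) 2 = 1 ∧ PySem.Int.floordiv (i + j) 2 = m) ↔ j = 2 * m + 1 - i := by
  rw [PySem.Int.mod_eq_emod_of_pos (by norm_num : (0:Int) < 2),
    PySem.Int.floordiv_eq_ediv_of_pos (by norm_num : (0:Int) < 2)]
  omega

-- the filtered inner range collapses to at most one j
theorem filter_range_pred (d : List (Int × String)) (i m a b : Int) :
    ((PySem.List.pyRange a b 1).filter (fun j =>
        decide (PySem.Int.mod (i + j) 2 = 1 ∧
          PySem.Int.floordiv (i + j) 2 = m ∧ dGet d i ≠ dGet d j)))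
      = if a ≤ 2 * m + 1 - i ∧ 2 * m + 1 - i < b ∧ dGet d i ≠ dGet d (2 * m + 1 - i) then
          [2 * m + 1 - i]
        else [] := by
  have hcong : ((PySem.List.pyRange a b 1).filter (fun j =>
        decide (PySem.Int.mod (i + j) 2 = 1 ∧
          PySem.Int.floordiv (i + j) 2 = m ∧ dGet d i ≠ dGet d j)))
      = ((PySem.List.pyRange a b 1).filter (fun j =>
        (j == 2 * m + 1 - i) && decide (dGet d i ≠ dGet d (2 * m + 1 - i)))) := by
    apply List.filter_congr
    intro j _
    by_cases hj : j = 2 * m + 1 - i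
    · subst hj
      have hiff : (PySem.Int.mod (i + (2 * m + 1 - i)) 2 = 1 ∧
          PySem.Int.floordiv (i + (2 * m + 1 - i)) 2 = m ∧
          dGet d i ≠ dGet d (2 * m + 1 - i)) ↔ dGet d i ≠ dGet d (2 * m + 1 - i) := by
        have h1 := (key_iff i (2 * m + 1 - i) m).2 rfl
        tauto
      simp
      intro _
      omega
    · have harith : ¬ ((i + j) % 2 = 1 ∧ (i + j) / 2 = m) := by omega
      have hbeq : (j == 2 * m + 1 - i) = false := by simp [hj]
      simp only [hbeq, Bool.false_and]
      by_cases h1 : (i + j) % 2 = 1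
      · have h2 : ¬ (i + j) / 2 = m := fun h => harith ⟨h1, h⟩
        simp [h1, h2]
      · simp [h1]
  rw [hcong]
  by_cases hd : dGet d i ≠ dGet d (2 * m + 1 - i)
  · have : ((PySem.List.pyRange a b 1).filter (fun j =>
        (j == 2 * m + 1 - i) && decide (dGet d i ≠ dGet d (2 * m + 1 - i))))
        = ((PySem.List.pyRange a b 1).filter (fun j => j == 2 * m + 1 - i)) := by
      apply List.filter_congr
      intro j _; simp [hd]
    rw [this, List.filter_beq]
    by_cases hm : a ≤ 2 * m + 1 - i ∧ 2 * m + 1 - i < b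
    · rw [List.count_eq_one_of_mem (PySem.List.nodup_pyRange_one a b)
        ((PySem.List.mem_pyRange_one).2 hm)]
      simp [hm, hd]
    · rw [List.count_eq_zero_of_not_mem (fun hmem =>
        hm ((PySem.List.mem_pyRange_one).1 hmem))]
      simp only [List.replicate_zero]
      rw [if_neg (by tauto)]
  · have : ((PySem.List.pyRange a b 1).filter (fun j =>
        (j == 2 * m + 1 - i) && decide (dGet d i ≠ dGet d (2 * m + 1 - i))))
        = ((PySem.List.pyRange a b 1).filter (fun _ => false)) := by
      apply List.filter_congr
      intro j _; simp [hd]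
    rw [this, List.filter_false, if_neg (by tauto)]

-- the flatMap over i from 1 to i collapses to ascPairs
theorem flatMap_asc (d : List (Int × String)) (n m : Int) :
    ∀ (fuel : Nat) (i : Int), i.toNat ≤ fuel → i ≤ m →
      ((PySem.List.pyRange 1 (i + 1) 1).flatMap (fun i =>
          ((PySem.List.pyRange (i + 1) (n + 1) 1).filter (fun j =>
              decide (PySem.Int.mod (i + j) 2 = 1 ∧
                PySem.Int.floordiv (i + j) 2 = m ∧ dGet d i ≠ dGet d j))).map
            (fun j => ((i, j) : Int × Int))))
        = ascPairs d n m i := by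
  intro fuel
  induction fuel with
  | zero =>
    intro i hf hi
    rw [PySem.List.pyRange_one_eq_nil (by omega), ascPairs.eq_def, dif_neg (by omega)]
    simp
  | succ f ih =>
    intro i hf hi
    by_cases h1 : 1 ≤ i
    · have ih' := ih (i - 1) (by omega) (by omega)
      rw [show i - 1 + 1 = i from by omega] at ih'
      rw [PySem.List.pyRange_one_succ_right (by omega), List.flatMap_append, ih']
      conv_rhs => rw [ascPairs.eq_def]
      simp only [List.flatMap_cons, List.flatMap_nil, List.append_nil]
      rw [filter_range_pred]
      by_cases hg : 2 * m + 1 - i ≤ n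
      · rw [dif_pos ⟨h1, hg⟩]
        by_cases hd : dGet d i ≠ dGet d (2 * m + 1 - i)
        · rw [if_pos ⟨by omega, by omega, hd⟩, if_pos hd]; simp
        · rw [if_neg (by tauto), if_neg hd]; simp
      · rw [dif_neg (by omega), if_neg (by omega), ascPairs.eq_def, dif_neg (by omega)]
        simp
    · rw [PySem.List.pyRange_one_eq_nil (by omega), ascPairs.eq_def, dif_neg (by omega)]
      simp

-- pairsW is ascPairs reversed
theorem pairsW_rev (d : List (Int × String)) (n m : Int) :
    ∀ (fuel : Nat) (i : Int), (n + 1 - (2 * m + 1 - i)).toNat ≤ fuel →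
      pairsW d n i (2 * m + 1 - i) = (ascPairs d n m i).reverse := by
  intro fuel
  induction fuel with
  | zero =>
    intro i hf
    rw [pairsW.eq_def, ascPairs.eq_def]
    by_cases hg : 1 ≤ i ∧ 2 * m + 1 - i ≤ n
    · exfalso; omega
    · rw [dif_neg hg, dif_neg hg]; simp
  | succ f ih =>
    intro i hf
    rw [pairsW.eq_def, ascPairs.eq_def]
    by_cases hg : 1 ≤ i ∧ 2 * m + 1 - i ≤ n
    · rw [dif_pos hg, dif_pos hg, List.reverse_append]
      have hj : 2 * m + 1 - (i - 1) = (2 * m + 1 - i) + 1 := by omega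
      have := ih (i - 1) (by omega)
      rw [hj] at this
      rw [this]
      by_cases hd : dGet d i ≠ dGet d (2 * m + 1 - i)
      · simp [hd]
      · simp [hd]
    · rw [dif_neg hg, dif_neg hg]; simp

-- the bucket of mirror m is A's walk list, reversed
theorem bucket_eq (d : List (Int × String)) (n m : Int) (h1 : 1 ≤ m) (h2 : m < n) :
    (buildBuckets d n).getD m [] = (pairsW d n m (m + 1)).reverse := by
  unfold buildBuckets
  rw [bBuild_getD]
  rw [PySem.List.pyRange_one_append 1 (m + 1) (n + 1) (by omega) (by omega),
    List.flatMap_append]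
  have hupper : ((PySem.List.pyRange (m + 1) (n + 1) 1).flatMap (fun i =>
      ((PySem.List.pyRange (i + 1) (n + 1) 1).filter (fun j =>
          decide (PySem.Int.mod (i + j) 2 = 1 ∧
            PySem.Int.floordiv (i + j) 2 = m ∧ dGet d i ≠ dGet d j))).map
        (fun j => ((i, j) : Int × Int)))) = [] := by
    apply List.flatMap_eq_nil_iff.2
    intro i hi
    have hib := (PySem.List.mem_pyRange_one).1 hi
    rw [filter_range_pred, if_neg (by omega)]
    simp
  rw [hupper, flatMap_asc d n m m.toNat m (le_refl _) (le_refl _)]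
  have := pairsW_rev d n m (n + 1 - (m + 1)).toNat m (by omega)
  have hjm : 2 * m + 1 - m = m + 1 := by omega
  rw [hjm] at this
  rw [this]
  simp

theorem go_eq (d : List (Int × String)) (n : Int) (ie : PySem.Dict (Int × Int) Bool)
    (hie : ∀ i j : Int, 1 ≤ i → i ≤ n → 1 ≤ j → j ≤ n →
      (ie.getD (i, j) true = false ↔ dGet d i ≠ dGet d j)) :
    ∀ ms : List Int, (∀ m ∈ ms, 1 ≤ m ∧ m < n) →
      getNewMirrorGoA d n ie ms = getNewMirrorGoB d (buildBuckets d n) ms := by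
  intro ms
  induction ms with
  | nil => intro _; rfl
  | cons m rest ih =>
    intro hm
    have hm1 := (hm m (by simp)).1
    have hm2 := (hm m (by simp)).2
    have hP : lines_different n ie m = pairsW d n m (m + 1) := by
      unfold lines_different
      rw [linesGo_eq d n ie hie ((n + 1 - (m + 1)).toNat) m (m + 1) PySem.Set.empty
        (le_refl _) (by omega) (by omega) (by intro p hp; simp [PySem.Set.empty] at hp)]
      simp [PySem.Set.empty]
    have hB := bucket_eq d n m hm1 hm2
    have hrest := ih (fun x hx => hm x (by simp [hx]))
    simp only [getNewMirrorGoA, getNewMirrorGoB, hP, hB]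
    rcases hPs : pairsW d n m (m + 1) with _ | ⟨p, ps⟩
    · simp [PySem.Set.len, hrest]
    · rcases ps with _ | ⟨q, qs⟩
      · rcases p with ⟨a, b⟩
        simp [PySem.Set.len, PySem.List.min2?, PySem.List.pyGet?, PySem.List.pyIdx?, hrest]
      · have hx : ¬ ((qs.length : Int) + 1 = 0) := by omega
        simp [PySem.Set.len, hx, hrest]

theorem keys_iff_of_perm (d : List (Int × String))
    (hperm : (d.map Prod.fst).Perm ((List.range d.length).map (fun i : Nat => ((i : Int) + 1)))) :
    ∀ k : Int, k ∈ d.map Prod.fst ↔ (1 ≤ k ∧ k ≤ (d.length : Int)) := by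
  intro k
  rw [hperm.mem_iff]
  constructor
  · intro hk
    rcases List.mem_map.1 hk with ⟨i, hi, rfl⟩
    rw [List.mem_range] at hi
    omega
  · intro hk
    exact List.mem_map.2 ⟨(k - 1).toNat, List.mem_range.2 (by omega), by omega⟩

-- ===== VERDICT (by name: the statement is the Claim_ definition above) =====
theorem get_new_mirror_spec : Claim_equal_get_new_mirror := by
  intro d _hdom hpre
  unfold Spec_get_new_mirror
  rcases hpre with hperm | hlen
  · -- main case: keys are a permutation of 1..n
    have hmem := keys_iff_of_perm d hperm
    have hget : ∀ k : Int, 1 ≤ k → k ≤ (d.length : Int) →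
        ∃ v, (PySem.Dict.mk d).get? k = some v := by
      intro k h1 h2
      exact get?_mk_of_mem_fst d k ((hmem k).2 ⟨h1, h2⟩)
    unfold get_new_mirror get_new_mirror_alt
    have hsize : ((PySem.Dict.mk d).size : Int) = (d.length : Int) := rfl
    rw [hsize]
    apply go_eq d (d.length : Int) _ _ _
      (fun m hmm => by
        have := (PySem.List.mem_pyRange_one (a := 1) (b := (d.length : Int)) (x := m)).1 hmm
        exact ⟨this.1, this.2⟩)
    intro i j h1 h2 h3 h4
    have hkeys : (PySem.Dict.mk d).keys = d.map Prod.fst := by simp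
    rw [hkeys]
    rw [getD_nested_insert
      (fun p : Int × Int => ((PySem.Dict.mk d).get? p.1 == (PySem.Dict.mk d).get? p.2))
      (d.map Prod.fst) (d.map Prod.fst) PySem.Dict.empty (i, j) true]
    rw [if_pos ⟨(hmem i).2 ⟨h1, h2⟩, (hmem j).2 ⟨h3, h4⟩⟩]
    obtain ⟨vi, hvi⟩ := hget i h1 h2
    obtain ⟨vj, hvj⟩ := hget j h3 h4
    have hdi : dGet d i = vi := by unfold dGet; rw [PySem.Dict.getD_eq_get?_getD, hvi]; rfl
    have hdj : dGet d j = vj := by unfold dGet; rw [PySem.Dict.getD_eq_get?_getD, hvj]; rfl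
    rw [hvi, hvj, hdi, hdj]
    constructor
    · intro hb hv; rw [hv] at hb; simp at hb
    · intro hv; simpa using hv
  · -- length ≤ 1: the mirror loop is empty
    match d, hlen with
    | [], _ => decide
    | [(k, s)], _ =>
      unfold get_new_mirror get_new_mirror_alt
      rfl

-- pairsW/ascPairs are proof-side helpers; everything above the claim block is what the claim uses.
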